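-- pv_equiv track=rewrite | github.com/dusansovilj/umap18_bbcf | datasets/userinterface.py | merge_sequence
-- ===== SOURCE A (Python) =====
-- def merge_sequence(mylist):
--     '''
--     Merge all the consecutive 'mouse XXX' and 'RCL' actions
--     '''
--     output=[]
--     temp=[]
--     last=-1
--     for j in mylist:
--         for i in j:
--             if i==last and i==1: #mousexxx  actions
--                 last=i
--                 continue
--             if i==last and i==3: #RCL actions
--                 last=i
--                 continue
--             last=i
--             temp.append(i)
--         output.append(temp)
--         temp=[]
--     return output
-- ===== SOURCE B (Python) =====
-- def merge_sequence(mylist):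
--     '''
--     Merge all the consecutive 'mouse XXX' and 'RCL' actions
--     '''
--     output = []
--     last = -1
--     for j in mylist:
--         temp = []
--         k = 0
--         n = len(j)
--         while k < n:
--             key = j[k]
--             r = k
--             while r < n and j[r] == key:
--                 r += 1
--             if key in (1, 3):
--                 if key != last:
--                     temp.append(key)
--             else:
--                 temp.extend(j[k:r])
--             last = key
--             k = r
--         output.append(temp)
--     return output
-- ===== Notes on version B (the rewrite author's own statement) =====
-- stated objective: alternative
-- what changed: B replaces A's per-element loop with per-state tracking by a run-based scan: each sublist is processed one maximal run of equal values at a time (an inner run-boundary scan), emitting one copy for 1/3-runs (none when the run continues the carried value) and the whole slice otherwise, with `last` carried across sublists.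
import Mathlib
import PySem

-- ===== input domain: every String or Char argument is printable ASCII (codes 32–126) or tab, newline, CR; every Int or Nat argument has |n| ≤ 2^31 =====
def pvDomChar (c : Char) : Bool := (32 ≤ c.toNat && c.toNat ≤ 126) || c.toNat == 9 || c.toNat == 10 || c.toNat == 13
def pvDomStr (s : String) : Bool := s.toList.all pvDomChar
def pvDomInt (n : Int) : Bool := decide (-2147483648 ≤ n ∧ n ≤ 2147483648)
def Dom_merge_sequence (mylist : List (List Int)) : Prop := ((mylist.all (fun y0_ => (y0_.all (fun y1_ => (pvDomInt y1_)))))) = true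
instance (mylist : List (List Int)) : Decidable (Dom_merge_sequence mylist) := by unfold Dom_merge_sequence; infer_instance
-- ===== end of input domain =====

-- B is a structurally different run-based re-implementation of A (same cost); equivalence is proved on all inputs.

-- ===== PORT A =====
-- body of A's inner `for i in j` loop, acting on the state (temp, last)
def mergeStepA (tl : List Int × Int) (i : Int) : List Int × Int :=
  if i == tl.2 && i == 1 then (tl.1, i)
  else if i == tl.2 && i == 3 then (tl.1, i)
  else (tl.1 ++ [i], i)

def merge_sequence (mylist : List (List Int)) : List (List Int) :=
  (mylist.foldl
    (fun (st : List (List Int) × List Int × Int) j =>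
      let (temp, last) := j.foldl mergeStepA (st.2.1, st.2.2)
      (st.1 ++ [temp], [], last))
    ([], [], -1)).1

-- ===== PORT B =====
-- B's inner while loop: process one maximal run of equal values per step
def mergeRunsB (j : List Int) (last : Int) (temp : List Int) : List Int × Int :=
  match j with
  | [] => (temp, last)
  | key :: rest =>
    let run := rest.takeWhile (fun x => x == key)
    let rest' := rest.dropWhile (fun x => x == key)
    let temp' :=
      if key == 1 || key == 3 then
        (if key != last then temp ++ [key] else temp)
      else temp ++ (key :: run)
    mergeRunsB rest' key temp'
termination_by j.length
decreasing_by
  simp only [List.length_cons]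
  have := List.length_dropWhile_le (fun x => x == key) rest
  omega

def merge_sequence_alt (mylist : List (List Int)) : List (List Int) :=
  (mylist.foldl
    (fun (st : List (List Int) × Int) j =>
      let (temp, last) := mergeRunsB j st.2 []
      (st.1 ++ [temp], last))
    ([], -1)).1

-- ===== PRECONDITION & SPEC =====
def Spec_merge_sequence (mylist : List (List Int)) (out : List (List Int)) : Prop := out = merge_sequence_alt mylist
instance (mylist : List (List Int)) (out : List (List Int)) : Decidable (Spec_merge_sequence mylist out) := by unfold Spec_merge_sequence; infer_instance

-- ===== CLAIM (what is proved, stated in full; the proofs are below) =====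
def Claim_equal_merge_sequence : Prop := ∀ (mylist : List (List Int)), Dom_merge_sequence mylist → Spec_merge_sequence mylist (merge_sequence mylist)

-- ===== LEMMAS AND PROOFS =====

-- folding A's step over a run of copies of `key`, starting with last = key
lemma foldl_mergeStepA_run (key : Int) (run : List Int) (h : ∀ x ∈ run, x = key) (temp : List Int) :
    run.foldl mergeStepA (temp, key) =
      ((if key = 1 ∨ key = 3 then temp else temp ++ run), key) := by
  induction run generalizing temp with
  | nil => simp
  | cons x rest ih =>
    have hx : x = key := h x (List.mem_cons_self)
    have hrest : ∀ y ∈ rest, y = key := fun y hy => h y (List.mem_cons_of_mem _ hy)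
    subst hx
    simp only [List.foldl_cons, mergeStepA]
    by_cases h1 : x = 1
    · subst h1; simpa using ih hrest temp
    · by_cases h3 : x = 3
      · subst h3; simpa using ih hrest temp
      · have := ih hrest (temp ++ [x])
        simp [h1, h3, this]

-- A's inner loop equals B's run-based inner loop
lemma inner_eq (j : List Int) (last : Int) (temp : List Int) :
    j.foldl mergeStepA (temp, last) = mergeRunsB j last temp := by
  induction hn : j.length using Nat.strong_induction_on generalizing j last temp with
  | _ n ih =>
    match j with
    | [] => simp [mergeRunsB]
    | key :: rest =>
      have hsplit := List.takeWhile_append_dropWhile (p := fun x => x == key) (l := rest)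
      have hrun : ∀ x ∈ rest.takeWhile (fun x => x == key), x = key := by
        intro x hx
        have := List.mem_takeWhile_imp hx
        simpa using this
      have hlen : (rest.dropWhile (fun x => x == key)).length < n := by
        have := List.length_dropWhile_le (fun x => x == key) rest
        simp only [List.length_cons] at hn; omega
      by_cases h1 : key = 1
      · subst h1
        by_cases hl : last = 1
        · subst hl
          have hstep : mergeStepA (temp, 1) 1 = (temp, 1) := by simp [mergeStepA]
          rw [List.foldl_cons, hstep, ← hsplit, List.foldl_append,
              foldl_mergeStepA_run 1 _ hrun, ih _ hlen _ _ _ rfl, mergeRunsB]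
          simp
        · have hl' : (1 : Int) ≠ last := fun h => hl h.symm
          have hstep : mergeStepA (temp, last) 1 = (temp ++ [1], 1) := by
            simp [mergeStepA, hl']
          rw [List.foldl_cons, hstep, ← hsplit, List.foldl_append,
              foldl_mergeStepA_run 1 _ hrun, ih _ hlen _ _ _ rfl, mergeRunsB]
          simp [hl']
      · by_cases h3 : key = 3
        · subst h3
          by_cases hl : last = 3
          · subst hl
            have hstep : mergeStepA (temp, 3) 3 = (temp, 3) := by simp [mergeStepA]
            rw [List.foldl_cons, hstep, ← hsplit, List.foldl_append,
                foldl_mergeStepA_run 3 _ hrun, ih _ hlen _ _ _ rfl, mergeRunsB]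
            simp
          · have hl' : (3 : Int) ≠ last := fun h => hl h.symm
            have hstep : mergeStepA (temp, last) 3 = (temp ++ [3], 3) := by
              simp [mergeStepA, hl']
            rw [List.foldl_cons, hstep, ← hsplit, List.foldl_append,
                foldl_mergeStepA_run 3 _ hrun, ih _ hlen _ _ _ rfl, mergeRunsB]
            simp [hl']
        · have hstep : mergeStepA (temp, last) key = (temp ++ [key], key) := by
            simp [mergeStepA, h1, h3]
          rw [List.foldl_cons, hstep, ← hsplit, List.foldl_append,
              foldl_mergeStepA_run key _ hrun, ih _ hlen _ _ _ rfl, mergeRunsB]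
          simp [h1, h3]

lemma outer_eq (mylist : List (List Int)) (output : List (List Int)) (last : Int) :
    (mylist.foldl
      (fun (st : List (List Int) × List Int × Int) j =>
        let (temp, last) := j.foldl mergeStepA (st.2.1, st.2.2)
        (st.1 ++ [temp], [], last))
      (output, [], last)).1 =
    (mylist.foldl
      (fun (st : List (List Int) × Int) j =>
        let (temp, last) := mergeRunsB j st.2 []
        (st.1 ++ [temp], last))
      (output, last)).1 := by
  induction mylist generalizing output last with
  | nil => rfl
  | cons j rest ih =>
    simp only [List.foldl_cons]
    rw [show (j.foldl mergeStepA (([] : List Int), last)) = mergeRunsB j last [] from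
      inner_eq j last []]
    exact ih _ _

-- ===== VERDICT (by name: the statement is the Claim_ definition above) =====
theorem merge_sequence_spec : Claim_equal_merge_sequence := by
  intro mylist _
  unfold Spec_merge_sequence merge_sequence merge_sequence_alt
  exact outer_eq mylist [] (-1)
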